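-- pv_equiv track=rewrite | github.com/Altynai/LeetCode | build-array-where-you-can-find-the-maximum-exactly-k-comparisons/answer.py | numOfArrays
-- ===== SOURCE A (Python) =====
-- def array(a, val=None):
--     return [val for _ in range(a)]
--
-- def array2d(a, b, val=None):
--     return [array(b, val=val) for _ in range(a)]
--
-- def numOfArrays(n: int, m: int, k: int) -> int:
--     dp = array2d(m + 1, k + 1, 0)
--     dp[0][0] = 1
--     mod = 1000000007
--
--     for i in range(1, n + 1):
--         dp2 = array2d(m + 1, k + 1, 0)
--
--         for maxVal in range(0, m + 1):
--             for incrLen in range(0, k + 1):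
--                 if dp[maxVal][incrLen] == 0:
--                     continue
--                 weight = dp[maxVal][incrLen]
--                 # less or equal
--                 for j in range(1, maxVal + 1):
--                     dp2[maxVal][incrLen] = (dp2[maxVal][incrLen] + weight) % mod
--                 # greater
--                 if incrLen < k:
--                     for j in range(maxVal + 1, m + 1):
--                         dp2[j][incrLen + 1] = (dp2[j][incrLen + 1] + weight) % mod
--
--         dp = dp2
--     return sum(dp[maxVal][k] for maxVal in range(1, m + 1)) % mod
-- ===== SOURCE B (Python) =====
-- def numOfArrays(n: int, m: int, k: int) -> int:
--     # Gather (pull) DP with a running prefix sum instead of A's scatter add-loops: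
--     # new[v][l] = v*dp[v][l] + sum(dp[u][l-1] for u < v), all mod p.
--     MOD = 1000000007
--     dp = [[0] * (k + 1) for _ in range(m + 1)]
--     dp[0][0] = 1
--     for _ in range(n):
--         new = [[0] * (k + 1) for _ in range(m + 1)]
--         for v in range(m + 1):
--             new[v][0] = (v * dp[v][0]) % MOD
--         for l in range(1, k + 1):
--             prefix = 0
--             for v in range(m + 1):
--                 new[v][l] = (v * dp[v][l] + prefix) % MOD
--                 prefix = (prefix + dp[v][l - 1]) % MOD
--         dp = new
--     return sum(dp[v][k] for v in range(1, m + 1)) % MOD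
-- ===== Notes on version B (the rewrite author's own statement) =====
-- stated objective: faster
-- what changed: Replaces A's scatter transition (for each source cell, an O(m) loop of repeated +weight updates into dp2) by a gather transition computed with a running prefix sum, so each new cell is filled in O(1): new[v][l] = (v*dp[v][l] + sum_{u<v} dp[u][l-1]) mod p; intended as faster (O(n*m*k) vs O(n*m^2*k)), measured ~8-11x at the largest sizes where both finish.
import Mathlib
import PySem

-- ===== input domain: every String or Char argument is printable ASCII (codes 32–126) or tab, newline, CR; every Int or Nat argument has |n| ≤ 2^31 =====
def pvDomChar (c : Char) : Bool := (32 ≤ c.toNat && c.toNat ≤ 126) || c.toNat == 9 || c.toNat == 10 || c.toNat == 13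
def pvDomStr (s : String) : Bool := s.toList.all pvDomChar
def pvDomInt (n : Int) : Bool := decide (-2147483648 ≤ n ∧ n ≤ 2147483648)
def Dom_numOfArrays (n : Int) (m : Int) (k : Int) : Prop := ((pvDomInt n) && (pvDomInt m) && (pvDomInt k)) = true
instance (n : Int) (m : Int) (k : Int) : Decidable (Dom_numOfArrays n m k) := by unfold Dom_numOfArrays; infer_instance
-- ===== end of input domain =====

-- B replaces A's scatter transition (per-source O(m) loops of repeated additions) by a
-- gather transition with a running prefix sum (one O(1) write per cell); intended as faster,
-- measured ~8-11x in a timing run at the largest sizes where both finish.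

-- shared grid helpers (Python list-of-lists indexing / creation, used by both ports)
def pvP : Int := 1000000007
def pvGet (g : Array (Array Int)) (i j : Nat) : Int := (g.getD i #[]).getD j 0
def pvSet (g : Array (Array Int)) (i j : Nat) (v : Int) : Array (Array Int) :=
  g.modify i (fun row => row.setIfInBounds j v)
def pvZeros (a b : Int) : Array (Array Int) :=
  Array.replicate a.toNat (Array.replicate b.toNat (0 : Int))

-- ===== PORT A =====
-- dp2[i][j] = (dp2[i][j] + w) % mod
def pvAdd (g : Array (Array Int)) (i j : Nat) (w : Int) : Array (Array Int) :=
  pvSet g i j ((pvGet g i j + w) % pvP)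

-- the body for one (maxVal = v, incrLen = l) pair of A's two inner scatter loops
def pvCellA (m k : Int) (dp g : Array (Array Int)) (v l : Nat) : Array (Array Int) :=
  if pvGet dp v l = 0 then g            -- if dp[maxVal][incrLen] == 0: continue
  else
    let w := pvGet dp v l
    -- for j in range(1, maxVal+1): dp2[maxVal][incrLen] += w (mod)
    let g1 := (List.range v).foldl (fun acc _ => pvAdd acc v l w) g
    -- if incrLen < k: for j in range(maxVal+1, m+1): dp2[j][incrLen+1] += w (mod)
    if (l : Int) < k then
      (List.range' (v + 1) ((m + 1).toNat - (v + 1))).foldl (fun acc j => pvAdd acc j (l + 1) w) g1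
    else g1

-- one iteration of A's outer 'for i in range(1, n+1)' loop
def pvStepA (m k : Int) (dp : Array (Array Int)) : Array (Array Int) :=
  (List.range (m + 1).toNat).foldl (fun g v =>
    (List.range (k + 1).toNat).foldl (fun g l => pvCellA m k dp g v l) g)
    (pvZeros (m + 1) (k + 1))

def numOfArrays (n : Int) (m : Int) (k : Int) : Int :=
  let dp0 := pvSet (pvZeros (m + 1) (k + 1)) 0 0 1
  let dp := (List.range n.toNat).foldl (fun d _ => pvStepA m k d) dp0
  ((List.range' 1 m.toNat).map (fun v => pvGet dp v k.toNat)).sum % pvP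

-- ===== PORT B =====
-- one iteration of B's outer loop: gather with a running prefix sum
def pvStepB (m k : Int) (dp : Array (Array Int)) : Array (Array Int) :=
  -- for v in range(m+1): new[v][0] = (v * dp[v][0]) % MOD
  let new1 := (List.range (m + 1).toNat).foldl
    (fun g v => pvSet g v 0 (((v : Int) * pvGet dp v 0) % pvP)) (pvZeros (m + 1) (k + 1))
  -- for l in range(1, k+1): prefix = 0; for v in range(m+1): …
  (List.range' 1 k.toNat).foldl (fun g l =>
    ((List.range (m + 1).toNat).foldl
      (fun (st : Array (Array Int) × Int) v =>
        (pvSet st.1 v l (((v : Int) * pvGet dp v l + st.2) % pvP),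
         (st.2 + pvGet dp v (l - 1)) % pvP))
      (g, 0)).1) new1

def numOfArrays_alt (n : Int) (m : Int) (k : Int) : Int :=
  let dp0 := pvSet (pvZeros (m + 1) (k + 1)) 0 0 1
  let dp := (List.range n.toNat).foldl (fun d _ => pvStepB m k d) dp0
  ((List.range' 1 m.toNat).map (fun v => pvGet dp v k.toNat)).sum % pvP

-- ===== PRECONDITION & SPEC =====
-- Pre_ excludes m < 0 or k < 0, where Python A (and B) raises IndexError at dp[0][0] = 1.
def Pre_numOfArrays (n : Int) (m : Int) (k : Int) : Prop := 0 ≤ m ∧ 0 ≤ k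
instance (n : Int) (m : Int) (k : Int) : Decidable (Pre_numOfArrays n m k) := by
  unfold Pre_numOfArrays; infer_instance
def pvWitness_numOfArrays : Int × Int × Int := (3, 2, 1)

def Spec_numOfArrays (n : Int) (m : Int) (k : Int) (out : Int) : Prop := out = numOfArrays_alt n m k
instance (n : Int) (m : Int) (k : Int) (out : Int) : Decidable (Spec_numOfArrays n m k out) := by
  unfold Spec_numOfArrays; infer_instance

-- ===== CLAIM (what is proved, stated in full; the proofs are below) =====
def Claim_equal_numOfArrays : Prop := ∀ (n : Int) (m : Int) (k : Int), Dom_numOfArrays n m k → Pre_numOfArrays n m k → Spec_numOfArrays n m k (numOfArrays n m k)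

-- ===== LEMMAS AND PROOFS =====

def pvOK (g : Array (Array Int)) : Prop := ∀ i j, 0 ≤ pvGet g i j ∧ pvGet g i j < pvP
def pvShaped (M K : Nat) (g : Array (Array Int)) : Prop :=
  g.size = M ∧ ∀ i, i < M → (g.getD i #[]).size = K

theorem pvRowD_eq_getElem {g : Array (Array Int)} {i : Nat} (hi : i < g.size) :
    g.getD i #[] = g[i] := by
  rw [Array.getD_eq_getD_getElem?, Array.getElem?_eq_getElem hi]
  rfl

theorem pvRowD_modify_self {g : Array (Array Int)} {f : Array Int → Array Int} {i : Nat}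
    (hi : i < g.size) : (g.modify i f).getD i #[] = f g[i] := by
  rw [Array.getD_eq_getD_getElem?, Array.getElem?_modify, if_pos rfl,
      Array.getElem?_eq_getElem hi]
  rfl

theorem pvRowD_modify_ne {g : Array (Array Int)} {f : Array Int → Array Int} {i x : Nat}
    (h : i ≠ x) : (g.modify i f).getD x #[] = g.getD x #[] := by
  rw [Array.getD_eq_getD_getElem?, Array.getElem?_modify, if_neg h,
      ← Array.getD_eq_getD_getElem?]

theorem pvEntryD_set_self {row : Array Int} {j : Nat} (v : Int) (hj : j < row.size) :
    (row.setIfInBounds j v).getD j 0 = v := by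
  rw [Array.getD_eq_getD_getElem?, Array.getElem?_setIfInBounds, if_pos rfl, if_pos hj]
  rfl

theorem pvEntryD_set_ne {row : Array Int} {j y : Nat} (v : Int) (h : j ≠ y) :
    (row.setIfInBounds j v).getD y 0 = row.getD y 0 := by
  rw [Array.getD_eq_getD_getElem?, Array.getElem?_setIfInBounds, if_neg h,
      ← Array.getD_eq_getD_getElem?]

theorem pvSet_oob_row {row : Array Int} {j : Nat} (v : Int) (h : ¬ j < row.size) :
    row.setIfInBounds j v = row := by
  unfold Array.setIfInBounds
  rw [dif_neg h]

theorem pvModify_oob {g : Array (Array Int)} {f : Array Int → Array Int} {i : Nat}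
    (h : ¬ i < g.size) : g.modify i f = g := by
  apply Array.ext (by rw [Array.size_modify])
  intro x h1 h2
  rw [Array.getElem_modify, if_neg (by omega)]

theorem pvGet_pvSet_self {g : Array (Array Int)} {i j : Nat} (v : Int)
    (hi : i < g.size) (hj : j < (g.getD i #[]).size) :
    pvGet (pvSet g i j v) i j = v := by
  unfold pvGet pvSet
  rw [pvRowD_modify_self hi, pvEntryD_set_self v (by rw [← pvRowD_eq_getElem hi]; exact hj)]

theorem pvGet_pvSet_ne {g : Array (Array Int)} {i j x y : Nat} (v : Int)
    (h : x ≠ i ∨ y ≠ j) : pvGet (pvSet g i j v) x y = pvGet g x y := by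
  unfold pvGet pvSet
  rcases h with h | h
  · rw [pvRowD_modify_ne (Ne.symm h)]
  · by_cases hx : i = x
    · subst hx
      by_cases hi : i < g.size
      · rw [pvRowD_modify_self hi, pvEntryD_set_ne v (Ne.symm h), pvRowD_eq_getElem hi]
      · rw [pvModify_oob hi]
    · rw [pvRowD_modify_ne hx]

theorem pvShaped_pvSet {M K : Nat} {g : Array (Array Int)} (h : pvShaped M K g)
    (i j : Nat) (v : Int) : pvShaped M K (pvSet g i j v) := by
  obtain ⟨h1, h2⟩ := h
  refine ⟨by simp [pvSet, h1], fun x hx => ?_⟩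
  unfold pvSet
  by_cases hxi : i = x
  · subst hxi
    rw [pvRowD_modify_self (by omega), Array.size_setIfInBounds, ← pvRowD_eq_getElem (by omega)]
    exact h2 i hx
  · rw [pvRowD_modify_ne hxi]
    exact h2 x hx

theorem pvOK_pvSet {g : Array (Array Int)} (h : pvOK g) (i j : Nat) {v : Int}
    (h0 : 0 ≤ v) (h1 : v < pvP) : pvOK (pvSet g i j v) := by
  intro x y
  by_cases hxy : x = i ∧ y = j
  · obtain ⟨hx, hy⟩ := hxy; subst hx; subst hy
    by_cases hi : x < g.size
    · by_cases hj : y < (g.getD x #[]).size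
      · rw [pvGet_pvSet_self v hi hj]; exact ⟨h0, h1⟩
      · have : pvGet (pvSet g x y v) x y = pvGet g x y := by
          unfold pvGet pvSet
          rw [pvRowD_modify_self hi,
              pvSet_oob_row v (by rw [← pvRowD_eq_getElem hi]; exact hj),
              pvRowD_eq_getElem hi]
        rw [this]; exact h x y
    · unfold pvSet
      rw [pvModify_oob hi]
      exact h x y
  · rw [pvGet_pvSet_ne v (by tauto)]
    exact h x y

theorem pvGetD_replicate {α : Type} (n : Nat) (r d : α) (x : Nat) :
    (Array.replicate n r).getD x d = if x < n then r else d := by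
  rw [Array.getD_eq_getD_getElem?, Array.getElem?_replicate]
  by_cases hx : x < n <;> simp [hx]

theorem pvGet_zeros (a b : Int) (x y : Nat) : pvGet (pvZeros a b) x y = 0 := by
  unfold pvGet pvZeros
  rw [pvGetD_replicate]
  by_cases hx : x < a.toNat
  · rw [if_pos hx, pvGetD_replicate]
    by_cases hy : y < b.toNat <;> simp [hy]
  · simp [hx]

theorem pvOK_zeros (a b : Int) : pvOK (pvZeros a b) := by
  intro x y; rw [pvGet_zeros]; constructor <;> first | rfl | decide

theorem pvShaped_zeros (m k : Int) :
    pvShaped (m + 1).toNat (k + 1).toNat (pvZeros (m + 1) (k + 1)) := by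
  refine ⟨by simp [pvZeros], fun i hi => ?_⟩
  unfold pvZeros
  rw [pvGetD_replicate, if_pos hi]
  simp

theorem pvP_pos : (0 : Int) < pvP := by decide

theorem pvMod_modeq (a : Int) : Int.ModEq pvP (a % pvP) a := Int.emod_emod_of_dvd a dvd_rfl
theorem pvMod_bounds (a : Int) : 0 ≤ a % pvP ∧ a % pvP < pvP :=
  ⟨Int.emod_nonneg a (by decide), Int.emod_lt_of_pos a pvP_pos⟩
theorem pvEq_of_modeq {a b : Int} (h : Int.ModEq pvP a b)
    (ha : 0 ≤ a ∧ a < pvP) (hb : 0 ≤ b ∧ b < pvP) : a = b := by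
  have := h
  unfold Int.ModEq at this
  rwa [Int.emod_eq_of_lt ha.1 ha.2, Int.emod_eq_of_lt hb.1 hb.2] at this

-- sum helpers
theorem pvSum_delta (L a : Nat) (f : Nat → Int) :
    ((List.range L).map (fun l => if l = a then f l else 0)).sum = if a < L then f a else 0 := by
  induction L with
  | zero => simp
  | succ L ih =>
    rw [List.range_succ, List.map_append, List.sum_append, ih]
    by_cases h1 : a < L
    · simp [if_pos h1, show ¬(L = a) by omega, show a < L + 1 by omega]
    · by_cases h2 : a = L
      · subst h2
        simp
      · simp [h1, show ¬(a < L + 1) by omega, show ¬(L = a) by omega]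

theorem pvSum_prefix (Mx x : Nat) (h : x ≤ Mx) (f : Nat → Int) :
    ((List.range Mx).map (fun v => if v < x then f v else 0)).sum
      = ((List.range x).map f).sum := by
  induction Mx with
  | zero => have : x = 0 := by omega
            subst this; simp
  | succ Mx ih =>
    by_cases h1 : x ≤ Mx
    · rw [List.range_succ, List.map_append, List.sum_append, ih h1]
      simp [show ¬(Mx < x) by omega]
    · have hx : x = Mx + 1 := by omega
      subst hx
      apply congrArg
      apply List.map_congr_left
      intro v hv
      rw [if_pos (List.mem_range.mp hv)]

theorem pvShaped_pvAdd {M K : Nat} {g : Array (Array Int)} (h : pvShaped M K g)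
    (i j : Nat) (w : Int) : pvShaped M K (pvAdd g i j w) :=
  pvShaped_pvSet h i j _

theorem pvOK_pvAdd {g : Array (Array Int)} (h : pvOK g) (i j : Nat) (w : Int) :
    pvOK (pvAdd g i j w) :=
  pvOK_pvSet h i j (pvMod_bounds _).1 (pvMod_bounds _).2

theorem pvAdd_ne {g : Array (Array Int)} {i j x y : Nat} (w : Int)
    (h : x ≠ i ∨ y ≠ j) : pvGet (pvAdd g i j w) x y = pvGet g x y :=
  pvGet_pvSet_ne _ h

theorem pvAdd_self {M K : Nat} {g : Array (Array Int)} {i j : Nat} (w : Int)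
    (hs : pvShaped M K g) (hi : i < M) (hj : j < K) :
    pvGet (pvAdd g i j w) i j = (pvGet g i j + w) % pvP := by
  unfold pvAdd
  exact pvGet_pvSet_self _ (by rw [hs.1]; omega) (by rw [hs.2 i hi]; omega)

-- A's 'less or equal' loop: v repeated additions into the one cell (i, j)
theorem pvIterAdd_main {M K : Nat} (t : Nat) (g : Array (Array Int)) (i j : Nat) (w : Int)
    (hs : pvShaped M K g) (ho : pvOK g) (hi : i < M) (hj : j < K) :
    pvShaped M K ((List.range t).foldl (fun a _ => pvAdd a i j w) g) ∧
    pvOK ((List.range t).foldl (fun a _ => pvAdd a i j w) g) ∧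
    Int.ModEq pvP (pvGet ((List.range t).foldl (fun a _ => pvAdd a i j w) g) i j)
      (pvGet g i j + (t : Int) * w) := by
  induction t with
  | zero =>
    simp only [List.range_zero, List.foldl_nil, Nat.cast_zero, zero_mul, add_zero]
    exact ⟨hs, ho, Int.ModEq.refl _⟩
  | succ t ih =>
    obtain ⟨ihs, iho, ihm⟩ := ih
    rw [List.range_succ, List.foldl_append, List.foldl_cons, List.foldl_nil]
    refine ⟨pvShaped_pvAdd ihs i j w, pvOK_pvAdd iho i j w, ?_⟩
    rw [pvAdd_self w ihs hi hj]
    refine ((pvMod_modeq _).trans (Int.ModEq.add_right w ihm)).trans ?_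
    have : pvGet g i j + (t : Int) * w + w = pvGet g i j + ((t : Nat) + 1 : Int) * w := by ring
    rw [this]
    push_cast
    exact Int.ModEq.refl _

theorem pvIterAdd_ne (t : Nat) (g : Array (Array Int)) (i j x y : Nat) (w : Int)
    (h : x ≠ i ∨ y ≠ j) :
    pvGet ((List.range t).foldl (fun a _ => pvAdd a i j w) g) x y = pvGet g x y := by
  induction t with
  | zero => rfl
  | succ t ih =>
    rw [List.range_succ, List.foldl_append, List.foldl_cons, List.foldl_nil]
    rw [pvAdd_ne w h, ih]

-- A's 'greater' loop: one addition into column tcol of each row s, …, s+c-1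
theorem pvScatter_main {M K : Nat} (c : Nat) (s : Nat) (g : Array (Array Int))
    (tcol : Nat) (w : Int) (hs : pvShaped M K g) (ho : pvOK g)
    (hc : s + c ≤ M) (ht : tcol < K) :
    pvShaped M K ((List.range' s c).foldl (fun a jj => pvAdd a jj tcol w) g) ∧
    pvOK ((List.range' s c).foldl (fun a jj => pvAdd a jj tcol w) g) ∧
    ∀ x y, x < M → y < K →
      Int.ModEq pvP (pvGet ((List.range' s c).foldl (fun a jj => pvAdd a jj tcol w) g) x y)
        (pvGet g x y + if s ≤ x ∧ x < s + c ∧ y = tcol then w else 0) := by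
  induction c generalizing s g with
  | zero =>
    refine ⟨hs, ho, fun x y hx hy => ?_⟩
    rw [if_neg (by omega), add_zero]
    exact Int.ModEq.refl _
  | succ c ih =>
    rw [List.range'_succ, List.foldl_cons]
    obtain ⟨ihs, iho, ihm⟩ :=
      ih (s + 1) (pvAdd g s tcol w) (pvShaped_pvAdd hs s tcol w) (pvOK_pvAdd ho s tcol w)
        (by omega) 
    refine ⟨ihs, iho, fun x y hx hy => ?_⟩
    refine (ihm x y hx hy).trans ?_
    by_cases hxy : x = s ∧ y = tcol
    · obtain ⟨hx1, hy1⟩ := hxy; subst hx1; subst hy1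
      rw [pvAdd_self w hs (by omega) ht, if_neg (by omega), add_zero,
          if_pos (by omega)]
      exact (pvMod_modeq _)
    · rw [pvAdd_ne w (by tauto)]
      by_cases hcond : s + 1 ≤ x ∧ x < s + 1 + c ∧ y = tcol
      · rw [if_pos hcond, if_pos (by omega)]
      · rw [if_neg hcond, if_neg (by omega)]

def pvEffCell (k : Int) (dp : Array (Array Int)) (v l x y : Nat) : Int :=
  (if x = v ∧ y = l then (v : Int) * pvGet dp v l else 0) +
  (if (l : Int) < k ∧ v < x ∧ y = l + 1 then pvGet dp v l else 0)

def pvEffRow (dp : Array (Array Int)) (v x y : Nat) : Int :=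
  (if x = v then (v : Int) * pvGet dp v y else 0) +
  (if v < x ∧ 1 ≤ y then pvGet dp v (y - 1) else 0)

def pvT (dp : Array (Array Int)) (x y : Nat) : Int :=
  (x : Int) * pvGet dp x y +
    (if 1 ≤ y then ((List.range x).map (fun u => pvGet dp u (y - 1))).sum else 0)

theorem pvCellA_main (m k : Int) (dp g : Array (Array Int)) (v l : Nat)
    (hs : pvShaped (m+1).toNat (k+1).toNat g) (ho : pvOK g)
    (hv : v < (m+1).toNat) (hl : l < (k+1).toNat) :
    pvShaped (m+1).toNat (k+1).toNat (pvCellA m k dp g v l) ∧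
    pvOK (pvCellA m k dp g v l) ∧
    ∀ x y, x < (m+1).toNat → y < (k+1).toNat →
      Int.ModEq pvP (pvGet (pvCellA m k dp g v l) x y)
        (pvGet g x y + pvEffCell k dp v l x y) := by
  by_cases hw : pvGet dp v l = 0
  · unfold pvCellA
    rw [if_pos hw]
    refine ⟨hs, ho, fun x y hx hy => ?_⟩
    unfold pvEffCell
    rw [hw]
    simp only [mul_zero, ite_self, add_zero]
    exact Int.ModEq.refl _
  · unfold pvCellA
    rw [if_neg hw]
    simp only []
    obtain ⟨s1, o1, m1⟩ := pvIterAdd_main v g v l (pvGet dp v l) hs ho hv hl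
    by_cases hlk : (l : Int) < k
    · rw [if_pos hlk]
      obtain ⟨s2, o2, m2⟩ :=
        pvScatter_main ((m+1).toNat - (v+1)) (v+1)
          ((List.range v).foldl (fun acc _ => pvAdd acc v l (pvGet dp v l)) g)
          (l+1) (pvGet dp v l) s1 o1 (by omega) (by omega)
      refine ⟨s2, o2, fun x y hx hy => ?_⟩
      refine (m2 x y hx hy).trans ?_
      unfold pvEffCell
      by_cases hxv : x = v ∧ y = l
      · obtain ⟨e1, e2⟩ := hxv; subst e1; subst e2
        rw [if_neg (by omega), add_zero, if_pos ⟨rfl, rfl⟩]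
        have hc2 : ¬((y : Int) < k ∧ x < x ∧ y = y + 1) := by omega
        rw [if_neg hc2, add_zero]
        exact m1
      · rw [pvIterAdd_ne v g v l x y _ (by tauto), if_neg hxv, zero_add]
        by_cases hc : v < x ∧ y = l + 1
        · rw [if_pos ⟨by omega, by omega, hc.2⟩, if_pos ⟨hlk, hc⟩]
        · have hc1 : ¬(v + 1 ≤ x ∧ x < v + 1 + ((m+1).toNat - (v+1)) ∧ y = l + 1) := by omega
          have hc2 : ¬((l : Int) < k ∧ v < x ∧ y = l + 1) := fun hh => hc ⟨hh.2.1, hh.2.2⟩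
          rw [if_neg hc1, if_neg hc2]
    · rw [if_neg hlk]
      refine ⟨s1, o1, fun x y hx hy => ?_⟩
      unfold pvEffCell
      have hc2 : ¬((l : Int) < k ∧ v < x ∧ y = l + 1) := fun hh => hlk hh.1
      rw [if_neg hc2, add_zero]
      by_cases hxv : x = v ∧ y = l
      · obtain ⟨e1, e2⟩ := hxv; subst e1; subst e2
        rw [if_pos ⟨rfl, rfl⟩]
        exact m1
      · rw [pvIterAdd_ne v g v l x y _ (by tauto), if_neg hxv, add_zero]

theorem pvEffCell_sum (k : Int) (dp : Array (Array Int)) (v x y : Nat)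
    (hy : y < (k+1).toNat) :
    ((List.range (k+1).toNat).map (fun l => pvEffCell k dp v l x y)).sum
      = pvEffRow dp v x y := by
  unfold pvEffCell pvEffRow
  rw [PySem.List.sum_map_add_int]
  have e1 : ((List.range (k+1).toNat).map
      (fun l => if x = v ∧ y = l then (v : Int) * pvGet dp v l else 0)).sum
      = if x = v then (v : Int) * pvGet dp v y else 0 := by
    have hcg : ((List.range (k+1).toNat).map
        (fun l => if x = v ∧ y = l then (v : Int) * pvGet dp v l else 0))
        = ((List.range (k+1).toNat).map
          (fun l => if l = y then (if x = v then (v : Int) * pvGet dp v l else 0) else 0)) :=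
      List.map_congr_left (fun l _ => by
        by_cases h1 : l = y
        · subst h1
          by_cases h2 : x = v
          · rw [if_pos ⟨h2, rfl⟩, if_pos rfl, if_pos h2]
          · rw [if_neg (fun hh => h2 hh.1), if_pos rfl, if_neg h2]
        · rw [if_neg (fun hh => h1 hh.2.symm), if_neg h1])
    rw [hcg, pvSum_delta _ y _, if_pos hy]
  have e2 : ((List.range (k+1).toNat).map
      (fun (l : Nat) => if (l : Int) < k ∧ v < x ∧ y = l + 1 then pvGet dp v l else 0)).sum
      = if v < x ∧ 1 ≤ y then pvGet dp v (y - 1) else 0 := by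
    have hcg : ((List.range (k+1).toNat).map
        (fun (l : Nat) => if (l : Int) < k ∧ v < x ∧ y = l + 1 then pvGet dp v l else 0))
        = ((List.range (k+1).toNat).map
          (fun l => if l = y - 1 then (if v < x ∧ 1 ≤ y then pvGet dp v l else 0) else 0)) :=
      List.map_congr_left (fun l hl => by
        have hlK : l < (k+1).toNat := List.mem_range.mp hl
        by_cases h1 : y = l + 1
        · have hly : l = y - 1 := by omega
          have hlk : (l : Int) < k := by omega
          rw [if_pos hly]
          by_cases h2 : v < x
          · rw [if_pos ⟨hlk, h2, h1⟩, if_pos ⟨h2, by omega⟩]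
          · rw [if_neg (fun hh => h2 hh.2.1), if_neg (fun hh => h2 hh.1)]
        · rw [if_neg (fun hh => h1 hh.2.2)]
          by_cases h2 : l = y - 1
          · rw [if_pos h2, if_neg (fun hh => h1 (by omega))]
          · rw [if_neg h2])
    rw [hcg, pvSum_delta _ (y - 1) _, if_pos (by omega)]
  rw [e1, e2]

theorem pvRowA_main (m k : Int) (dp g : Array (Array Int)) (v : Nat)
    (hs : pvShaped (m+1).toNat (k+1).toNat g) (ho : pvOK g) (hv : v < (m+1).toNat) :
    pvShaped (m+1).toNat (k+1).toNat
      ((List.range (k+1).toNat).foldl (fun g l => pvCellA m k dp g v l) g) ∧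
    pvOK ((List.range (k+1).toNat).foldl (fun g l => pvCellA m k dp g v l) g) ∧
    ∀ x y, x < (m+1).toNat → y < (k+1).toNat →
      Int.ModEq pvP
        (pvGet ((List.range (k+1).toNat).foldl (fun g l => pvCellA m k dp g v l) g) x y)
        (pvGet g x y + pvEffRow dp v x y) := by
  have aux : ∀ L, L ≤ (k+1).toNat →
      pvShaped (m+1).toNat (k+1).toNat
        ((List.range L).foldl (fun g l => pvCellA m k dp g v l) g) ∧
      pvOK ((List.range L).foldl (fun g l => pvCellA m k dp g v l) g) ∧
      ∀ x y, x < (m+1).toNat → y < (k+1).toNat →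
        Int.ModEq pvP
          (pvGet ((List.range L).foldl (fun g l => pvCellA m k dp g v l) g) x y)
          (pvGet g x y + ((List.range L).map (fun l => pvEffCell k dp v l x y)).sum) := by
    intro L
    induction L with
    | zero =>
      intro _
      refine ⟨hs, ho, fun x y hx hy => ?_⟩
      simp only [List.range_zero, List.foldl_nil, List.map_nil, List.sum_nil, add_zero]
      exact Int.ModEq.refl _
    | succ L ih =>
      intro hL
      obtain ⟨ihs, iho, ihm⟩ := ih (by omega)
      rw [List.range_succ, List.foldl_append, List.foldl_cons, List.foldl_nil]
      obtain ⟨cs, co, cm⟩ := pvCellA_main m k dp _ v L ihs iho hv (by omega)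
      refine ⟨cs, co, fun x y hx hy => ?_⟩
      refine (cm x y hx hy).trans ?_
      refine (Int.ModEq.add_right _ (ihm x y hx hy)).trans ?_
      rw [List.map_append, List.sum_append]
      simp only [List.map_cons, List.map_nil, List.sum_cons, List.sum_nil, add_zero]
      rw [add_assoc]
  obtain ⟨rs, ro, rm⟩ := aux (k+1).toNat (le_refl _)
  refine ⟨rs, ro, fun x y hx hy => ?_⟩
  refine (rm x y hx hy).trans ?_
  rw [pvEffCell_sum k dp v x y hy]

theorem pvEffRow_sum (dp : Array (Array Int)) (M x y : Nat) (hx : x < M) :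
    ((List.range M).map (fun v => pvEffRow dp v x y)).sum = pvT dp x y := by
  unfold pvEffRow pvT
  rw [PySem.List.sum_map_add_int]
  have e1 : ((List.range M).map (fun v => if x = v then (v : Int) * pvGet dp v y else 0)).sum
      = (x : Int) * pvGet dp x y := by
    have hcg : ((List.range M).map (fun v => if x = v then (v : Int) * pvGet dp v y else 0))
        = ((List.range M).map (fun v => if v = x then (v : Int) * pvGet dp v y else 0)) :=
      List.map_congr_left (fun v _ => by
        by_cases h : v = x
        · rw [if_pos h.symm, if_pos h]
        · rw [if_neg (fun hh => h hh.symm), if_neg h])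
    rw [hcg, pvSum_delta _ x _, if_pos hx]
  have e2 : ((List.range M).map (fun v => if v < x ∧ 1 ≤ y then pvGet dp v (y - 1) else 0)).sum
      = if 1 ≤ y then ((List.range x).map (fun u => pvGet dp u (y - 1))).sum else 0 := by
    by_cases hy1 : 1 ≤ y
    · rw [if_pos hy1]
      have hcg : ((List.range M).map (fun v => if v < x ∧ 1 ≤ y then pvGet dp v (y - 1) else 0))
          = ((List.range M).map (fun v => if v < x then pvGet dp v (y - 1) else 0)) :=
        List.map_congr_left (fun v _ => by
          by_cases h : v < x
          · rw [if_pos ⟨h, hy1⟩, if_pos h]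
          · rw [if_neg (fun hh => h hh.1), if_neg h])
      rw [hcg]
      exact pvSum_prefix M x (by omega) _
    · rw [if_neg hy1]
      simp [hy1]
  rw [e1, e2]

theorem pvStepA_main (m k : Int) (dp : Array (Array Int)) :
    pvShaped (m+1).toNat (k+1).toNat (pvStepA m k dp) ∧
    pvOK (pvStepA m k dp) ∧
    ∀ x y, x < (m+1).toNat → y < (k+1).toNat →
      Int.ModEq pvP (pvGet (pvStepA m k dp) x y) (pvT dp x y) := by
  have aux : ∀ V, V ≤ (m+1).toNat →
      pvShaped (m+1).toNat (k+1).toNat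
        ((List.range V).foldl (fun g v =>
          (List.range (k+1).toNat).foldl (fun g l => pvCellA m k dp g v l) g)
          (pvZeros (m+1) (k+1))) ∧
      pvOK ((List.range V).foldl (fun g v =>
          (List.range (k+1).toNat).foldl (fun g l => pvCellA m k dp g v l) g)
          (pvZeros (m+1) (k+1))) ∧
      ∀ x y, x < (m+1).toNat → y < (k+1).toNat →
        Int.ModEq pvP
          (pvGet ((List.range V).foldl (fun g v =>
            (List.range (k+1).toNat).foldl (fun g l => pvCellA m k dp g v l) g)
            (pvZeros (m+1) (k+1))) x y)
          (((List.range V).map (fun v => pvEffRow dp v x y)).sum) := by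
    intro V
    induction V with
    | zero =>
      intro _
      refine ⟨pvShaped_zeros m k, pvOK_zeros _ _, fun x y hx hy => ?_⟩
      simp only [List.range_zero, List.foldl_nil, List.map_nil, List.sum_nil]
      rw [pvGet_zeros]
    | succ V ih =>
      intro hV
      obtain ⟨ihs, iho, ihm⟩ := ih (by omega)
      rw [List.range_succ, List.foldl_append, List.foldl_cons, List.foldl_nil]
      obtain ⟨rs, ro, rm⟩ := pvRowA_main m k dp _ V ihs iho (by omega)
      refine ⟨rs, ro, fun x y hx hy => ?_⟩
      refine (rm x y hx hy).trans ?_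
      refine (Int.ModEq.add_right _ (ihm x y hx hy)).trans ?_
      rw [List.map_append, List.sum_append]
      simp only [List.map_cons, List.map_nil, List.sum_cons, List.sum_nil, add_zero]
      exact Int.ModEq.refl _
  obtain ⟨rs, ro, rm⟩ := aux (m+1).toNat (le_refl _)
  refine ⟨by exact rs, by exact ro, fun x y hx hy => ?_⟩
  have := (rm x y hx hy).trans (by rw [pvEffRow_sum dp _ x y hx])
  exact this

theorem pvColZeroB_main (m k : Int) (dp : Array (Array Int)) :
    pvShaped (m+1).toNat (k+1).toNat
      ((List.range (m+1).toNat).foldl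
        (fun g v => pvSet g v 0 (((v : Int) * pvGet dp v 0) % pvP)) (pvZeros (m+1) (k+1))) ∧
    pvOK ((List.range (m+1).toNat).foldl
        (fun g v => pvSet g v 0 (((v : Int) * pvGet dp v 0) % pvP)) (pvZeros (m+1) (k+1))) ∧
    ∀ x y, x < (m+1).toNat → y < (k+1).toNat →
      pvGet ((List.range (m+1).toNat).foldl
        (fun g v => pvSet g v 0 (((v : Int) * pvGet dp v 0) % pvP)) (pvZeros (m+1) (k+1))) x y
      = if y = 0 ∧ x < (m+1).toNat then ((x : Int) * pvGet dp x 0) % pvP else 0 := by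
  have aux : ∀ V, V ≤ (m+1).toNat →
      pvShaped (m+1).toNat (k+1).toNat
        ((List.range V).foldl
          (fun g v => pvSet g v 0 (((v : Int) * pvGet dp v 0) % pvP)) (pvZeros (m+1) (k+1))) ∧
      pvOK ((List.range V).foldl
          (fun g v => pvSet g v 0 (((v : Int) * pvGet dp v 0) % pvP)) (pvZeros (m+1) (k+1))) ∧
      ∀ x y, x < (m+1).toNat → y < (k+1).toNat →
        pvGet ((List.range V).foldl
          (fun g v => pvSet g v 0 (((v : Int) * pvGet dp v 0) % pvP)) (pvZeros (m+1) (k+1))) x y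
        = if y = 0 ∧ x < V then ((x : Int) * pvGet dp x 0) % pvP else 0 := by
    intro V
    induction V with
    | zero =>
      intro _
      refine ⟨pvShaped_zeros m k, pvOK_zeros _ _, fun x y hx hy => ?_⟩
      simp only [List.range_zero, List.foldl_nil]
      rw [pvGet_zeros, if_neg (by omega)]
    | succ V ih =>
      intro hV
      obtain ⟨ihs, iho, ihv⟩ := ih (by omega)
      rw [List.range_succ, List.foldl_append, List.foldl_cons, List.foldl_nil]
      refine ⟨pvShaped_pvSet ihs _ _ _,
        pvOK_pvSet iho _ _ (pvMod_bounds _).1 (pvMod_bounds _).2, fun x y hx hy => ?_⟩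
      by_cases hxy : x = V ∧ y = 0
      · obtain ⟨e1, e2⟩ := hxy; subst e1; subst e2
        rw [pvGet_pvSet_self _ (by rw [ihs.1]; omega) (by rw [ihs.2 x (by omega)]; omega),
            if_pos ⟨rfl, by omega⟩]
      · rw [pvGet_pvSet_ne _ (by tauto), ihv x y hx hy]
        by_cases hc : y = 0 ∧ x < V
        · rw [if_pos hc, if_pos ⟨hc.1, by omega⟩]
        · rw [if_neg hc, if_neg (fun hh => hc ⟨hh.1, by
              have : x ≠ V := fun e => hxy ⟨e, hh.1⟩
              omega⟩)]
  exact aux (m+1).toNat (le_refl _)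

theorem pvColB_main (m k : Int) (dp g : Array (Array Int)) (l : Nat)
    (hs : pvShaped (m+1).toNat (k+1).toNat g) (ho : pvOK g)
    (hl1 : 1 ≤ l) (hlK : l < (k+1).toNat) :
    pvShaped (m+1).toNat (k+1).toNat
      (((List.range (m+1).toNat).foldl
        (fun (st : Array (Array Int) × Int) v =>
          (pvSet st.1 v l (((v : Int) * pvGet dp v l + st.2) % pvP),
           (st.2 + pvGet dp v (l - 1)) % pvP)) (g, 0)).1) ∧
    pvOK (((List.range (m+1).toNat).foldl
        (fun (st : Array (Array Int) × Int) v =>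
          (pvSet st.1 v l (((v : Int) * pvGet dp v l + st.2) % pvP),
           (st.2 + pvGet dp v (l - 1)) % pvP)) (g, 0)).1) ∧
    ∀ x y, x < (m+1).toNat → y < (k+1).toNat →
      Int.ModEq pvP
        (pvGet (((List.range (m+1).toNat).foldl
          (fun (st : Array (Array Int) × Int) v =>
            (pvSet st.1 v l (((v : Int) * pvGet dp v l + st.2) % pvP),
             (st.2 + pvGet dp v (l - 1)) % pvP)) (g, 0)).1) x y)
        (if y = l ∧ x < (m+1).toNat then pvT dp x y else pvGet g x y) := by
  have aux : ∀ V, V ≤ (m+1).toNat →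
      pvShaped (m+1).toNat (k+1).toNat
        (((List.range V).foldl
          (fun (st : Array (Array Int) × Int) v =>
            (pvSet st.1 v l (((v : Int) * pvGet dp v l + st.2) % pvP),
             (st.2 + pvGet dp v (l - 1)) % pvP)) (g, 0)).1) ∧
      pvOK (((List.range V).foldl
          (fun (st : Array (Array Int) × Int) v =>
            (pvSet st.1 v l (((v : Int) * pvGet dp v l + st.2) % pvP),
             (st.2 + pvGet dp v (l - 1)) % pvP)) (g, 0)).1) ∧
      (0 ≤ ((List.range V).foldl
          (fun (st : Array (Array Int) × Int) v =>
            (pvSet st.1 v l (((v : Int) * pvGet dp v l + st.2) % pvP),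
             (st.2 + pvGet dp v (l - 1)) % pvP)) (g, 0)).2 ∧
        ((List.range V).foldl
          (fun (st : Array (Array Int) × Int) v =>
            (pvSet st.1 v l (((v : Int) * pvGet dp v l + st.2) % pvP),
             (st.2 + pvGet dp v (l - 1)) % pvP)) (g, 0)).2 < pvP) ∧
      Int.ModEq pvP
        (((List.range V).foldl
          (fun (st : Array (Array Int) × Int) v =>
            (pvSet st.1 v l (((v : Int) * pvGet dp v l + st.2) % pvP),
             (st.2 + pvGet dp v (l - 1)) % pvP)) (g, 0)).2)
        (((List.range V).map (fun u => pvGet dp u (l - 1))).sum) ∧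
      ∀ x y, x < (m+1).toNat → y < (k+1).toNat →
        Int.ModEq pvP
          (pvGet (((List.range V).foldl
            (fun (st : Array (Array Int) × Int) v =>
              (pvSet st.1 v l (((v : Int) * pvGet dp v l + st.2) % pvP),
               (st.2 + pvGet dp v (l - 1)) % pvP)) (g, 0)).1) x y)
          (if y = l ∧ x < V then pvT dp x y else pvGet g x y) := by
    intro V
    induction V with
    | zero =>
      intro _
      refine ⟨hs, ho, ⟨le_refl 0, pvP_pos⟩, by simp, fun x y hx hy => ?_⟩
      rw [if_neg (by omega)]
      exact Int.ModEq.refl _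
    | succ V ih =>
      intro hV
      obtain ⟨ihs, iho, ihb, ihp, ihv⟩ := ih (by omega)
      rw [List.range_succ, List.foldl_append, List.foldl_cons, List.foldl_nil]
      refine ⟨pvShaped_pvSet ihs _ _ _,
        pvOK_pvSet iho _ _ (pvMod_bounds _).1 (pvMod_bounds _).2,
        ⟨(pvMod_bounds _).1, (pvMod_bounds _).2⟩, ?_, fun x y hx hy => ?_⟩
      · refine (pvMod_modeq _).trans ?_
        refine (Int.ModEq.add_right _ ihp).trans ?_
        rw [List.map_append, List.sum_append]
        simp only [List.map_cons, List.map_nil, List.sum_cons, List.sum_nil, add_zero]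
        exact Int.ModEq.refl _
      · by_cases hxy : x = V ∧ y = l
        · obtain ⟨e1, e2⟩ := hxy; subst e1; subst e2
          rw [pvGet_pvSet_self _ (by rw [ihs.1]; omega) (by rw [ihs.2 x (by omega)]; omega),
              if_pos ⟨rfl, by omega⟩]
          refine (pvMod_modeq _).trans ?_
          refine (Int.ModEq.add (Int.ModEq.refl _) ihp).trans ?_
          unfold pvT
          rw [if_pos hl1]
        · rw [pvGet_pvSet_ne _ (by tauto)]
          refine (ihv x y hx hy).trans ?_
          by_cases hc : y = l ∧ x < V
          · rw [if_pos hc, if_pos ⟨hc.1, by omega⟩]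
          · by_cases hc2 : y = l ∧ x < V + 1
            · have hxV : ¬ x < V := fun hlt => hc ⟨hc2.1, hlt⟩
              exact absurd ⟨by omega, hc2.1⟩ hxy
            · rw [if_neg hc, if_neg hc2]
  exact (aux (m+1).toNat (le_refl _)).imp id (fun h => h.imp id (fun h => h.2.2))

theorem pvStepB_main (m k : Int) (hk : 0 ≤ k) (dp : Array (Array Int)) :
    pvShaped (m+1).toNat (k+1).toNat (pvStepB m k dp) ∧
    pvOK (pvStepB m k dp) ∧
    ∀ x y, x < (m+1).toNat → y < (k+1).toNat →
      Int.ModEq pvP (pvGet (pvStepB m k dp) x y) (pvT dp x y) := by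
  obtain ⟨zs, zo, zv⟩ := pvColZeroB_main m k dp
  have aux : ∀ c, c ≤ k.toNat →
      pvShaped (m+1).toNat (k+1).toNat
        ((List.range' 1 c).foldl (fun g l =>
          ((List.range (m+1).toNat).foldl
            (fun (st : Array (Array Int) × Int) v =>
              (pvSet st.1 v l (((v : Int) * pvGet dp v l + st.2) % pvP),
               (st.2 + pvGet dp v (l - 1)) % pvP)) (g, 0)).1)
          ((List.range (m+1).toNat).foldl
            (fun g v => pvSet g v 0 (((v : Int) * pvGet dp v 0) % pvP)) (pvZeros (m+1) (k+1)))) ∧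
      pvOK ((List.range' 1 c).foldl (fun g l =>
          ((List.range (m+1).toNat).foldl
            (fun (st : Array (Array Int) × Int) v =>
              (pvSet st.1 v l (((v : Int) * pvGet dp v l + st.2) % pvP),
               (st.2 + pvGet dp v (l - 1)) % pvP)) (g, 0)).1)
          ((List.range (m+1).toNat).foldl
            (fun g v => pvSet g v 0 (((v : Int) * pvGet dp v 0) % pvP)) (pvZeros (m+1) (k+1)))) ∧
      ∀ x y, x < (m+1).toNat → y < (k+1).toNat →
        Int.ModEq pvP
          (pvGet ((List.range' 1 c).foldl (fun g l =>
            ((List.range (m+1).toNat).foldl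
              (fun (st : Array (Array Int) × Int) v =>
                (pvSet st.1 v l (((v : Int) * pvGet dp v l + st.2) % pvP),
                 (st.2 + pvGet dp v (l - 1)) % pvP)) (g, 0)).1)
            ((List.range (m+1).toNat).foldl
              (fun g v => pvSet g v 0 (((v : Int) * pvGet dp v 0) % pvP)) (pvZeros (m+1) (k+1)))) x y)
          (if y ≤ c then pvT dp x y else 0) := by
    intro c
    induction c with
    | zero =>
      intro _
      refine ⟨zs, zo, fun x y hx hy => ?_⟩
      simp only [List.range'_zero, List.foldl_nil]
      rw [zv x y hx hy]
      by_cases hy0 : y = 0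
      · subst hy0
        rw [if_pos ⟨rfl, hx⟩, if_pos (le_refl 0)]
        unfold pvT
        rw [if_neg (by omega)]
        rw [add_zero]
        exact pvMod_modeq _
      · rw [if_neg (by tauto), if_neg (by omega)]
    | succ c ih =>
      intro hc
      obtain ⟨ihs, iho, ihv⟩ := ih (by omega)
      rw [List.range'_concat, List.foldl_append, List.foldl_cons, List.foldl_nil]
      obtain ⟨cs, co, cv⟩ := pvColB_main m k dp _ (1 + 1 * c) ihs iho (by omega) (by omega)
      refine ⟨cs, co, fun x y hx hy => ?_⟩
      refine (cv x y hx hy).trans ?_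
      by_cases hyl : y = 1 + 1 * c
      · rw [if_pos ⟨hyl, hx⟩, if_pos (by omega)]
      · rw [if_neg (by tauto)]
        refine (ihv x y hx hy).trans ?_
        by_cases hylec : y ≤ c
        · rw [if_pos hylec, if_pos (by omega)]
        · rw [if_neg hylec, if_neg (by omega)]
  obtain ⟨rs, ro, rv⟩ := aux k.toNat (le_refl _)
  have hrw : pvStepB m k dp = (List.range' 1 k.toNat).foldl (fun g l =>
      ((List.range (m+1).toNat).foldl
        (fun (st : Array (Array Int) × Int) v =>
          (pvSet st.1 v l (((v : Int) * pvGet dp v l + st.2) % pvP),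
           (st.2 + pvGet dp v (l - 1)) % pvP)) (g, 0)).1)
      ((List.range (m+1).toNat).foldl
        (fun g v => pvSet g v 0 (((v : Int) * pvGet dp v 0) % pvP)) (pvZeros (m+1) (k+1))) := rfl
  rw [hrw]
  refine ⟨rs, ro, fun x y hx hy => ?_⟩
  refine (rv x y hx hy).trans ?_
  rw [if_pos (by omega)]

theorem pvGrid_ext {M K : Nat} {g g' : Array (Array Int)}
    (hg : pvShaped M K g) (hg' : pvShaped M K g')
    (h : ∀ x y, x < M → y < K → pvGet g x y = pvGet g' x y) : g = g' := by
  apply Array.ext (by rw [hg.1, hg'.1])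
  intro i h1 h2
  have hiM : i < M := by rw [← hg.1]; exact h1
  apply Array.ext
  · rw [← pvRowD_eq_getElem h1, ← pvRowD_eq_getElem h2, hg.2 i hiM, hg'.2 i hiM]
  · intro j hj1 hj2
    have hjK : j < K := by
      have hr := hg.2 i hiM
      rw [pvRowD_eq_getElem h1] at hr
      omega
    have e1 : g[i][j] = pvGet g i j := by
      unfold pvGet
      rw [pvRowD_eq_getElem h1, Array.getD_eq_getD_getElem?, Array.getElem?_eq_getElem hj1]
      rfl
    have e2 : g'[i][j] = pvGet g' i j := by
      unfold pvGet
      rw [pvRowD_eq_getElem h2, Array.getD_eq_getD_getElem?, Array.getElem?_eq_getElem hj2]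
      rfl
    rw [e1, e2, h i j hiM hjK]

theorem pvStep_eq (m k : Int) (hk : 0 ≤ k) (dp : Array (Array Int)) :
    pvStepA m k dp = pvStepB m k dp := by
  obtain ⟨as_, ao, av⟩ := pvStepA_main m k dp
  obtain ⟨bs, bo, bv⟩ := pvStepB_main m k hk dp
  refine pvGrid_ext as_ bs (fun x y hx hy => ?_)
  exact pvEq_of_modeq ((av x y hx hy).trans (bv x y hx hy).symm) (ao x y) (bo x y)

theorem pvMain_eq (n m k : Int) (hk : 0 ≤ k) :
    numOfArrays n m k = numOfArrays_alt n m k := by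
  unfold numOfArrays numOfArrays_alt
  have hstep : (fun (d : Array (Array Int)) (_ : Nat) => pvStepA m k d)
      = (fun (d : Array (Array Int)) (_ : Nat) => pvStepB m k d) :=
    funext fun d => funext fun _ => pvStep_eq m k hk d
  rw [hstep]

-- ===== VERDICT (by name: the statement is the Claim_ definition above) =====
theorem numOfArrays_spec : Claim_equal_numOfArrays := by
  intro n m k _ hpre
  unfold Pre_numOfArrays at hpre
  unfold Spec_numOfArrays
  exact pvMain_eq n m k hpre.2
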